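-- pv_equiv track=rewrite | github.com/wikimedia/operations-dumps | xmldumps-backup/dumps/intervals.py | get_covered_ranges
-- ===== SOURCE A (Python) =====
-- def merge_ranges(intervals):
--     """
--     given a list of intervals (int1, int2, <ignored if present>), combine any
--     intervals that cover consecutive ranges and return the new list
--     WITH ONLY the first two elements of every tuple however, we toss
--     anything else.
--     """
--     if not intervals:
--         return []
--     intervals = sorted(intervals, key=lambda x: int(x[0]))
--     to_return = []
--     start = None
--     end = None
--     for interval in intervals:
--         if start is None:
--             start = interval[0]
--             end = interval[1]
--         elif interval[0] <= end + 1 and interval[0] >= start: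
--             # this interval is right after the last one we looked at or
--             # overlaps it, so merge it in
--             end = interval[1]
--         else:
--             to_return.append((start, end))
--             start = interval[0]
--             end = interval[1]
--     if start:
--         to_return.append((start, end))
--     return to_return
--
-- def get_covered_ranges(intervals_to_filter, intervals_missing):
--     """
--     given two lists of intervals (int1, int2, <ignored if present>), return
--     the ranges in the first list that are covered by ranges in the second list
--     example:
--        (2, 200, *) is in [(1,2, *), (2,50, *), (50,500, *)]
--         but not in [(30,600, *), ...]
--     where the '*' are ignored values
--     """
--     to_keep = []
--     covered = merge_ranges(intervals_missing)
--     intervals_to_filter = sorted(intervals_to_filter, key=lambda x: int(x[0]))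
--     for interval in intervals_to_filter:
--         for entry in covered:
--             if interval[0] >= entry[0] and interval[1] <= entry[1]:
--                 to_keep.append(interval)
--     return [interval for interval in intervals_to_filter
--             if interval in to_keep]
-- ===== SOURCE B (Python) =====
-- def get_covered_ranges(intervals_to_filter, intervals_missing):
--     """
--     Same task as A, single merge-scan instead of A's nested loops:
--     merge the missing intervals with a stack (last-element update), then
--     sweep the sorted intervals once with a running maximum of the ends of
--     all merged ranges whose start is <= the interval's start.
--     (Also keeps a merged range that starts at 0, which A's `if start:`
--     truthiness test accidentally drops.)
--     """
--     covered = []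
--     for interval in sorted(intervals_missing, key=lambda x: int(x[0])):
--         if covered and interval[0] <= covered[-1][1] + 1:
--             covered[-1] = (covered[-1][0], interval[1])
--         else:
--             covered.append((interval[0], interval[1]))
--     result = []
--     rest = covered
--     best = None  # max end among merged ranges whose start <= current interval start
--     for interval in sorted(intervals_to_filter, key=lambda x: int(x[0])):
--         while rest and rest[0][0] <= interval[0]:
--             if best is None or rest[0][1] > best:
--                 best = rest[0][1]
--             rest = rest[1:]
--         if best is not None and interval[1] <= best:
--             result.append(interval)
--     return result
-- ===== Notes on version B (the rewrite author's own statement) =====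
-- stated objective: alternative
-- what changed: Replaces A's state-machine merge plus a nested scan of every interval against every merged range plus a quadratic membership re-pass with a stack merge and a single two-pointer sweep of the sorted intervals keeping a running maximum covered end; B also keeps a merged range that starts at 0, which A's `if start:` truthiness test drops.
-- intended difference: On inputs where the start-sorted intervals_missing end in a gap-free merged run that begins exactly at 0 (with a gap before it) and intervals_to_filter contains an interval within that run's bounds, A's `if start:` (0 is falsy) drops that merged run and omits the intervals covered only by it, while B keeps the run and returns them; B's value is intended since the run (0, e) does cover them. — e.g. on get_covered_ranges([(1, 5)], [(0, 10)]): A returns [], B returns [(1, 5)]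
import Mathlib
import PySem

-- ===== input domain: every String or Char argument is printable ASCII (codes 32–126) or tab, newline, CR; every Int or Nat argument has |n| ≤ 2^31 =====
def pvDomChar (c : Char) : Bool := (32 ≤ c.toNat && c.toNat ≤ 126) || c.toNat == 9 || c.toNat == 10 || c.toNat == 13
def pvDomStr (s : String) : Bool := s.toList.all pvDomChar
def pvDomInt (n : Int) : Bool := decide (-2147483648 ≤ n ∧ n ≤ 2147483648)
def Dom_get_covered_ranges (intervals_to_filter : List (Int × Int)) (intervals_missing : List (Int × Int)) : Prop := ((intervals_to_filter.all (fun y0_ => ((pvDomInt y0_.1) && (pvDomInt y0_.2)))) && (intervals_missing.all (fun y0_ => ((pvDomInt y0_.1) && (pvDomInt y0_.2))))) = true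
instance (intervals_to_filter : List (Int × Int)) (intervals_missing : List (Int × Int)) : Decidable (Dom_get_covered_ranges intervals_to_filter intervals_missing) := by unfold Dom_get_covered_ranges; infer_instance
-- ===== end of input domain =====

-- B merges the missing intervals with a single stack pass and filters the sorted intervals with one
-- running-maximum sweep instead of A's nested scans; it also keeps a merged range starting at 0,
-- which A's `if start:` truthiness test accidentally drops (see D_ below).

-- ===== PORT A =====
-- A's merge loop state: (to_return, the pending (start, end) — Python's two variables start/end,
-- which are always both None or both set, carried here as one Option).
def pvMergeStepA (acc : List (Int × Int) × Option (Int × Int)) (interval : Int × Int) :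
    List (Int × Int) × Option (Int × Int) :=
  match acc.2 with
  | none => (acc.1, some (interval.1, interval.2))
  | some (s, e) =>
    if interval.1 ≤ e + 1 ∧ interval.1 ≥ s then (acc.1, some (s, interval.2))
    else (acc.1 ++ [(s, e)], some (interval.1, interval.2))

def merge_ranges (intervals : List (Int × Int)) : List (Int × Int) :=
  if intervals = [] then []
  else
    let st := (PySem.List.sorted intervals (fun x => x.1)).foldl pvMergeStepA ([], none)
    match st.2 with
    | some (s, e) => if s ≠ 0 then st.1 ++ [(s, e)] else st.1   -- Python `if start:` — 0 is falsy
    | none => st.1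

def get_covered_ranges (intervals_to_filter : List (Int × Int)) (intervals_missing : List (Int × Int)) : List (Int × Int) :=
  let covered := merge_ranges intervals_missing
  let srt := PySem.List.sorted intervals_to_filter (fun x => x.1)
  let to_keep := srt.foldl (fun acc interval =>
      covered.foldl (fun acc2 entry =>
        if interval.1 ≥ entry.1 ∧ interval.2 ≤ entry.2 then acc2 ++ [interval] else acc2) acc) []
  srt.filter (fun interval => decide (interval ∈ to_keep))

-- ===== PORT B =====
-- stack merge: `covered[-1] = (covered[-1][0], interval[1])` / `covered.append(...)`
def pvAltMergeStep (covered : List (Int × Int)) (interval : Int × Int) : List (Int × Int) :=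
  match covered.getLast? with
  | some (s, e) =>
    if interval.1 ≤ e + 1 then covered.dropLast ++ [(s, interval.2)]
    else covered ++ [(interval.1, interval.2)]
  | none => [(interval.1, interval.2)]

-- the inner `while rest and rest[0][0] <= a: ...` loop
def pvAdvance (best : Option Int) (a : Int) : List (Int × Int) → Option Int × List (Int × Int)
  | [] => (best, [])
  | (s, e) :: rest =>
    if s ≤ a then
      pvAdvance (match best with
                 | none => some e
                 | some b => if e > b then some e else some b) a rest
    else (best, (s, e) :: rest)

def pvSweepStep (acc : List (Int × Int) × List (Int × Int) × Option Int) (interval : Int × Int) :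
    List (Int × Int) × List (Int × Int) × Option Int :=
  let (best', rest') := pvAdvance acc.2.2 interval.1 acc.2.1
  (match best' with
   | some b => if interval.2 ≤ b then acc.1 ++ [interval] else acc.1
   | none => acc.1, rest', best')

def get_covered_ranges_alt (intervals_to_filter : List (Int × Int)) (intervals_missing : List (Int × Int)) : List (Int × Int) :=
  let covered := (PySem.List.sorted intervals_missing (fun x => x.1)).foldl pvAltMergeStep []
  ((PySem.List.sorted intervals_to_filter (fun x => x.1)).foldl pvSweepStep ([], covered, none)).1

-- ===== PRECONDITION & SPEC =====
-- On inputs where the start-sorted intervals_missing end in a gap-free run that begins exactly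
-- at 0 (a gap before it) and intervals_to_filter contains an interval lying within that run's
-- bounds, A's `if start:` truthiness test (0 is falsy) silently drops that merged run, so A omits
-- the intervals covered only by it, while B keeps the run and returns them, which is the intended
-- behaviour (the run (0, e) does cover them).
def pvL (m : List (Int × Int)) : List (Int × Int) := PySem.List.sorted m Prod.fst

def D_get_covered_ranges (intervals_to_filter : List (Int × Int)) (intervals_missing : List (Int × Int)) : Prop :=
  ∃ j ∈ List.range (pvL intervals_missing).length,
    ((pvL intervals_missing).drop j).head?.any (fun h => h.1 == 0) = true ∧
    ((pvL intervals_missing).take j).getLast?.all (fun p => p.2 < -1) = true ∧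
    ((pvL intervals_missing).drop j).IsChain (fun a b => b.1 ≤ a.2 + 1) ∧
    intervals_to_filter.any (fun i =>
      0 ≤ i.1 && (pvL intervals_missing).getLast?.any (fun z => i.2 ≤ z.2)) = true
instance (intervals_to_filter : List (Int × Int)) (intervals_missing : List (Int × Int)) : Decidable (D_get_covered_ranges intervals_to_filter intervals_missing) := by unfold D_get_covered_ranges; infer_instance

def Spec_get_covered_ranges (intervals_to_filter : List (Int × Int)) (intervals_missing : List (Int × Int)) (out : List (Int × Int)) : Prop := ¬ D_get_covered_ranges intervals_to_filter intervals_missing → out = get_covered_ranges_alt intervals_to_filter intervals_missing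
instance (intervals_to_filter : List (Int × Int)) (intervals_missing : List (Int × Int)) (out : List (Int × Int)) : Decidable (Spec_get_covered_ranges intervals_to_filter intervals_missing out) := by unfold Spec_get_covered_ranges; infer_instance

def pvDiffWitness_get_covered_ranges : (List (Int × Int)) × (List (Int × Int)) := ([(1, 5)], [(0, 10)])
def pvDiffWitnessOut_get_covered_ranges : (List (Int × Int)) × (List (Int × Int)) := ([], [(1, 5)])

-- ===== CLAIM (what is proved, stated in full; the proofs are below) =====
def Claim_unchanged_get_covered_ranges : Prop := ∀ (intervals_to_filter : List (Int × Int)) (intervals_missing : List (Int × Int)), Dom_get_covered_ranges intervals_to_filter intervals_missing → Spec_get_covered_ranges intervals_to_filter intervals_missing (get_covered_ranges intervals_to_filter intervals_missing)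
def Claim_changed_get_covered_ranges : Prop := Dom_get_covered_ranges (pvDiffWitness_get_covered_ranges.1) (pvDiffWitness_get_covered_ranges.2) ∧ D_get_covered_ranges (pvDiffWitness_get_covered_ranges.1) (pvDiffWitness_get_covered_ranges.2) ∧ get_covered_ranges (pvDiffWitness_get_covered_ranges.1) (pvDiffWitness_get_covered_ranges.2) = pvDiffWitnessOut_get_covered_ranges.1 ∧ get_covered_ranges_alt (pvDiffWitness_get_covered_ranges.1) (pvDiffWitness_get_covered_ranges.2) = pvDiffWitnessOut_get_covered_ranges.2 ∧ pvDiffWitnessOut_get_covered_ranges.1 ≠ pvDiffWitnessOut_get_covered_ranges.2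

-- ===== LEMMAS AND PROOFS =====

-- proof-side helpers: the maximal gap-free runs of a start-sorted interval list (the common
-- characterisation both merge loops are reduced to), interval containment, and
def pvRunsGo (s e : Int) : List (Int × Int) → List (Int × Int)
  | [] => [(s, e)]
  | (a, b) :: rest => if a ≤ e + 1 then pvRunsGo s b rest else (s, e) :: pvRunsGo a b rest

def pvRuns : List (Int × Int) → List (Int × Int)
  | [] => []
  | (a, b) :: rest => pvRunsGo a b rest

def pvCovers (r i : Int × Int) : Bool := r.1 ≤ i.1 && i.2 ≤ r.2

-- the end of the last element ((s,e)::L).getLast.2, and the running-max update of B's sweep, and "value ≤ the running max"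
def pvLast2 (d : Int) (L : List (Int × Int)) : Int :=
  match L.getLast? with
  | some z => z.2
  | none => d

-- the running-max update of B's sweep:
def pvBestStep (b : Option Int) (r : Int × Int) : Option Int :=
  match b with
  | none => some r.2
  | some b0 => if r.2 > b0 then some r.2 else some b0

def pvBestLe (o : Option Int) (v : Int) : Bool :=
  match o with
  | some b => decide (v ≤ b)
  | none => false

theorem pvRunsGo_ne_nil (s e : Int) (L : List (Int × Int)) : pvRunsGo s e L ≠ [] := by
  induction L generalizing s e with
  | nil => simp [pvRunsGo]
  | cons x rest ih =>
    obtain ⟨a, b⟩ := x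
    simp only [pvRunsGo]
    split
    · exact ih s b
    · simp

-- A's merge fold, on a start-sorted list, computes the runs: finished runs in to_return,
-- the last run pending.
theorem foldA_runsGo (L : List (Int × Int)) (acc : List (Int × Int)) (s e : Int)
    (hs : ∀ x ∈ L, s ≤ x.1) (hp : L.Pairwise (fun a b => a.1 ≤ b.1)) :
    L.foldl pvMergeStepA (acc, some (s, e)) =
      (acc ++ (pvRunsGo s e L).dropLast, (pvRunsGo s e L).getLast?) := by
  induction L generalizing acc s e with
  | nil => simp [pvRunsGo]
  | cons x rest ih =>
    obtain ⟨a, b⟩ := x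
    have hsa : s ≤ a := hs (a, b) (by simp)
    have hp' := (List.pairwise_cons.mp hp).2
    have ha' := (List.pairwise_cons.mp hp).1
    by_cases hle : a ≤ e + 1
    · simp only [List.foldl_cons, pvMergeStepA, pvRunsGo]
      rw [if_pos ⟨hle, hsa⟩, if_pos hle]
      exact ih acc s b (fun x hx => le_trans hsa (by exact_mod_cast ha' x hx)) hp'
    · simp only [List.foldl_cons, pvMergeStepA, pvRunsGo]
      rw [if_neg (fun h => hle h.1), if_neg hle]
      rw [ih (acc ++ [(s, e)]) a b (fun x hx => by exact_mod_cast ha' x hx) hp']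
      have hne := pvRunsGo_ne_nil a b rest
      rw [List.dropLast_cons_of_ne_nil hne]
      cases hrg : pvRunsGo a b rest with
      | nil => exact absurd hrg hne
      | cons y t => simp [List.getLast?_cons_cons]

theorem merge_ranges_eq (m : List (Int × Int)) :
    merge_ranges m =
      (let rs := pvRuns (PySem.List.sorted m (fun x => x.1))
       if rs.getLast?.any (fun l => l.1 == 0) then rs.dropLast else rs) := by
  by_cases hm : m = []
  · subst hm; rfl
  · unfold merge_ranges
    rw [if_neg hm]
    cases hL : PySem.List.sorted m (fun x => x.1) with
    | nil => exact absurd ((PySem.List.sorted_eq_nil_iff m _ _).mp hL) hm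
    | cons x rest =>
      obtain ⟨a, b⟩ := x
      have hp := PySem.List.sorted_pairwise m (fun x => x.1)
      rw [hL, List.pairwise_cons] at hp
      have step1 : pvMergeStepA ([], none) (a, b) = ([], some (a, b)) := rfl
      rw [List.foldl_cons, step1, foldA_runsGo rest [] a b hp.1 hp.2]
      simp only [pvRuns, List.nil_append]
      have hne := pvRunsGo_ne_nil a b rest
      cases hgl : (pvRunsGo a b rest).getLast? with
      | none => exact absurd (List.getLast?_eq_none_iff.mp hgl) hne
      | some l =>
        obtain ⟨ls, le⟩ := l
        by_cases h0 : ls = 0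
        · subst h0; simp
        · simp [h0, List.dropLast_append_getLast? _ hgl]

-- membership in A's to_keep accumulator
theorem mem_innerFold (covered : List (Int × Int)) (i : Int × Int) (acc : List (Int × Int)) (x : Int × Int) :
    x ∈ covered.foldl (fun acc2 entry =>
        if i.1 ≥ entry.1 ∧ i.2 ≤ entry.2 then acc2 ++ [i] else acc2) acc ↔
      x ∈ acc ∨ (x = i ∧ covered.any (fun r => pvCovers r i) = true) := by
  induction covered generalizing acc with
  | nil => simp
  | cons r rest ih =>
    simp only [List.foldl_cons, List.any_cons]
    by_cases hc : i.1 ≥ r.1 ∧ i.2 ≤ r.2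
    · rw [if_pos hc, ih]
      have hcv : pvCovers r i = true := by
        simp only [pvCovers, Bool.and_eq_true, decide_eq_true_eq]; exact ⟨hc.1, hc.2⟩
      simp only [hcv, Bool.true_or, List.mem_append, List.mem_singleton]
      tauto
    · rw [if_neg hc, ih]
      have hcv : pvCovers r i = false := by
        simp only [pvCovers, Bool.and_eq_false_iff, decide_eq_false_iff_not]
        by_cases h1 : r.1 ≤ i.1
        · exact Or.inr (fun h2 => hc ⟨h1, h2⟩)
        · exact Or.inl h1
      simp [hcv]

theorem mem_outerFold (covered F : List (Int × Int)) (acc : List (Int × Int)) (x : Int × Int) :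
    x ∈ F.foldl (fun acc interval =>
        covered.foldl (fun acc2 entry =>
          if interval.1 ≥ entry.1 ∧ interval.2 ≤ entry.2 then acc2 ++ [interval] else acc2) acc) acc ↔
      x ∈ acc ∨ (x ∈ F ∧ covered.any (fun r => pvCovers r x) = true) := by
  induction F generalizing acc with
  | nil => simp
  | cons i F' ih =>
    rw [List.foldl_cons, ih, mem_innerFold]
    simp only [List.mem_cons]
    constructor
    · rintro ((h | ⟨rfl, h⟩) | ⟨h1, h2⟩)
      · exact Or.inl h
      · exact Or.inr ⟨Or.inl rfl, h⟩
      · exact Or.inr ⟨Or.inr h1, h2⟩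
    · rintro (h | ⟨(rfl | h1), h2⟩)
      · exact Or.inl (Or.inl h)
      · exact Or.inl (Or.inr ⟨rfl, h2⟩)
      · exact Or.inr ⟨h1, h2⟩

-- A as a filter of the sorted list
theorem getA_eq_filter (f m : List (Int × Int)) :
    get_covered_ranges f m =
      (PySem.List.sorted f (fun x => x.1)).filter
        (fun i => (merge_ranges m).any (fun r => pvCovers r i)) := by
  unfold get_covered_ranges
  apply List.filter_congr
  intro x hx
  rw [Bool.eq_iff_iff, decide_eq_true_iff, mem_outerFold]
  simp [hx]

-- B's stack merge computes the runs
theorem foldB_runsGo (L : List (Int × Int)) (acc : List (Int × Int)) (s e : Int) :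
    L.foldl pvAltMergeStep (acc ++ [(s, e)]) = acc ++ pvRunsGo s e L := by
  induction L generalizing acc s e with
  | nil => simp [pvRunsGo]
  | cons x rest ih =>
    obtain ⟨a, b⟩ := x
    simp only [List.foldl_cons, pvAltMergeStep, List.getLast?_concat, pvRunsGo]
    split
    · rw [List.dropLast_concat, ih]
    · rw [ih (acc ++ [(s,e)]) a b, List.append_assoc]; rfl

theorem foldB_runs (L : List (Int × Int)) : L.foldl pvAltMergeStep [] = pvRuns L := by
  cases L with
  | nil => rfl
  | cons x rest =>
    obtain ⟨a, b⟩ := x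
    have : pvAltMergeStep [] (a, b) = [] ++ [(a, b)] := rfl
    rw [List.foldl_cons, this, foldB_runsGo, pvRuns]
    rfl

-- pvAdvance splits off exactly the prefix with start ≤ a
theorem pvAdvance_spec (rest : List (Int × Int)) (best : Option Int) (a : Int) :
    ∃ consumed rest', rest = consumed ++ rest' ∧ (∀ r ∈ consumed, r.1 ≤ a) ∧
      (∀ hh : rest' ≠ [], a < (rest'.head hh).1) ∧
      pvAdvance best a rest = (consumed.foldl pvBestStep best, rest') := by
  induction rest generalizing best with
  | nil => exact ⟨[], [], rfl, by simp, by simp, rfl⟩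
  | cons r t ih =>
    obtain ⟨sr, er⟩ := r
    by_cases h : sr ≤ a
    · obtain ⟨c, r', hsplit, hc, hr', heq⟩ := ih (pvBestStep best (sr, er))
      refine ⟨(sr, er) :: c, r', by rw [hsplit]; rfl, ?_, hr', ?_⟩
      · intro x hx
        rcases List.mem_cons.mp hx with rfl | hx
        · exact h
        · exact hc x hx
      · simp only [pvAdvance, if_pos h, List.foldl_cons]
        exact heq
    · refine ⟨[], (sr, er) :: t, rfl, by simp, ?_, ?_⟩
      · intro _; simpa using lt_of_not_ge h
      · simp [pvAdvance, h]

theorem pvBestLe_foldl (d : List (Int × Int)) (init : Option Int) (v : Int) :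
    pvBestLe (d.foldl pvBestStep init) v =
      (d.any (fun r => decide (v ≤ r.2)) || pvBestLe init v) := by
  induction d generalizing init with
  | nil => simp
  | cons r t ih =>
    rw [List.foldl_cons, ih, List.any_cons]
    cases init with
    | none => simp [pvBestStep, pvBestLe, Bool.or_comm]
    | some b0 =>
      simp only [pvBestStep]
      by_cases hgt : r.2 > b0
      · rw [if_pos hgt]
        simp only [pvBestLe]
        by_cases hv : v ≤ r.2 <;> by_cases hv2 : v ≤ b0 <;>
          (simp [hv, hv2]; try omega)
      · rw [if_neg hgt]
        simp only [pvBestLe]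
        by_cases hv : v ≤ r.2 <;> by_cases hv2 : v ≤ b0 <;>
          (simp [hv, hv2]; try omega)

-- runs of a start-sorted list: every run starts at or after s, and run starts are sorted
theorem pvRunsGo_starts (L : List (Int × Int)) (s e : Int)
    (hs : ∀ x ∈ L, s ≤ x.1) (hp : L.Pairwise (fun a b => a.1 ≤ b.1)) :
    (∀ r ∈ pvRunsGo s e L, s ≤ r.1) ∧
      (pvRunsGo s e L).Pairwise (fun a b => a.1 ≤ b.1) := by
  induction L generalizing s e with
  | nil => simp [pvRunsGo]
  | cons x rest ih =>
    obtain ⟨a, b⟩ := x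
    have hsa : s ≤ a := hs (a, b) (by simp)
    rw [List.pairwise_cons] at hp
    simp only [pvRunsGo]
    by_cases hle : a ≤ e + 1
    · rw [if_pos hle]
      exact ih s b (fun x hx => le_trans hsa (hp.1 x hx)) hp.2
    · rw [if_neg hle]
      obtain ⟨h1, h2⟩ := ih a b (fun x hx => hp.1 x hx) hp.2
      refine ⟨?_, ?_⟩
      · intro r hr
        rcases List.mem_cons.mp hr with rfl | hr
        · exact le_refl _
        · exact le_trans hsa (h1 r hr)
      · exact List.pairwise_cons.mpr ⟨fun r hr => le_trans hsa (h1 r hr), h2⟩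

theorem pvRuns_pairwise (L : List (Int × Int)) (hp : L.Pairwise (fun a b => a.1 ≤ b.1)) :
    (pvRuns L).Pairwise (fun a b => a.1 ≤ b.1) := by
  cases L with
  | nil => simp [pvRuns]
  | cons x rest =>
    obtain ⟨a, b⟩ := x
    rw [List.pairwise_cons] at hp
    exact (pvRunsGo_starts rest a b hp.1 hp.2).2

-- B's sweep, with the invariant made explicit, is a filter
theorem sweep_filter (F : List (Int × Int)) (C : List (Int × Int)) :
    ∀ (done rest res : List (Int × Int)) (best : Option Int),
      C = done ++ rest →
      C.Pairwise (fun a b => a.1 ≤ b.1) →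
      F.Pairwise (fun a b => a.1 ≤ b.1) →
      (∀ r ∈ done, ∀ i ∈ F, r.1 ≤ i.1) →
      best = done.foldl pvBestStep none →
      (F.foldl pvSweepStep (res, rest, best)).1 =
        res ++ F.filter (fun i => C.any (fun r => pvCovers r i)) := by
  induction F with
  | nil => intro done rest res best _ _ _ _ _; simp
  | cons i F' ih =>
    intro done rest res best hC hpC hpF hdone hbest
    obtain ⟨c, rest', hsplit, hcons, hhead, hadv⟩ := pvAdvance_spec rest best i.1
    have hCsplit : C = (done ++ c) ++ rest' := by rw [hC, hsplit, List.append_assoc]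
    have hpF' := (List.pairwise_cons.mp hpF).2
    have hiF' := (List.pairwise_cons.mp hpF).1
    -- all elements of done ++ c start at or before i.1
    have hdone' : ∀ r ∈ done ++ c, r.1 ≤ i.1 := by
      intro r hr
      rcases List.mem_append.mp hr with hr | hr
      · exact hdone r hr i (by simp)
      · exact hcons r hr
    -- all elements of rest' start strictly after i.1
    have hrest' : ∀ r ∈ rest', i.1 < r.1 := by
      cases rest' with
      | nil => simp
      | cons rh rt =>
        intro r hr
        have hh := hhead (by simp)
        simp only [List.head_cons] at hh
        rcases List.mem_cons.mp hr with rfl | hr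
        · exact hh
        · have hpR : (rh :: rt).Pairwise (fun a b => a.1 ≤ b.1) := by
            have := hCsplit ▸ hpC
            exact ((List.pairwise_append.mp this).2.1)
          exact lt_of_lt_of_le hh ((List.pairwise_cons.mp hpR).1 r hr)
    -- the filter predicate at i equals the running-max test
    have hbest' : (c.foldl pvBestStep best) = (done ++ c).foldl pvBestStep none := by
      rw [List.foldl_append, hbest]
    have hpred : C.any (fun r => pvCovers r i) = pvBestLe (c.foldl pvBestStep best) i.2 := by
      rw [hbest', pvBestLe_foldl, hCsplit, List.any_append]
      have h2 : rest'.any (fun r => pvCovers r i) = false := by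
        rw [List.any_eq_false]
        intro r hr
        simp only [pvCovers, Bool.and_eq_true, decide_eq_true_eq, not_and]
        intro h1
        exact absurd h1 (not_le.mpr (hrest' r hr))
      have h1 : (done ++ c).any (fun r => pvCovers r i) =
          (done ++ c).any (fun r => decide (i.2 ≤ r.2)) := by
        rw [Bool.eq_iff_iff, List.any_eq_true, List.any_eq_true]
        constructor
        · rintro ⟨r, hr, hcv⟩
          exact ⟨r, hr, by simpa [pvCovers] using (Bool.and_eq_true _ _ |>.mp hcv).2⟩
        · rintro ⟨r, hr, hle⟩
          refine ⟨r, hr, ?_⟩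
          simp only [pvCovers, Bool.and_eq_true, decide_eq_true_eq]
          exact ⟨hdone' r hr, by simpa using hle⟩
      rw [h2, Bool.or_false, h1]
      simp [pvBestLe]
    -- one step of the fold
    rw [List.foldl_cons]
    have hstep : pvSweepStep (res, rest, best) i =
        (res ++ (if C.any (fun r => pvCovers r i) then [i] else []), rest',
          c.foldl pvBestStep best) := by
      simp only [pvSweepStep, hadv, hpred]
      cases hcb : c.foldl pvBestStep best with
      | none => simp [pvBestLe]
      | some b0 =>
        simp only [pvBestLe]
        by_cases hv : i.2 ≤ b0 <;> simp [hv]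
    rw [hstep, ih (done ++ c) rest' _ _ hCsplit hpC hpF'
          (fun r hr i' hi' => le_trans (hdone' r hr) (hiF' i' hi')) hbest']
    rw [List.filter_cons]
    by_cases hp : C.any (fun r => pvCovers r i) = true <;> simp [hp]

theorem getB_eq_filter (f m : List (Int × Int)) :
    get_covered_ranges_alt f m =
      (PySem.List.sorted f (fun x => x.1)).filter
        (fun i => (pvRuns (PySem.List.sorted m (fun x => x.1))).any (fun r => pvCovers r i)) := by
  unfold get_covered_ranges_alt
  simp only []
  rw [foldB_runs]
  rw [sweep_filter (PySem.List.sorted f (fun x => x.1))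
        (pvRuns (PySem.List.sorted m (fun x => x.1))) []
        (pvRuns (PySem.List.sorted m (fun x => x.1))) [] none (by simp)
        (pvRuns_pairwise _ (PySem.List.sorted_pairwise m (fun x => x.1)))
        (PySem.List.sorted_pairwise f (fun x => x.1)) (by simp) rfl]
  rfl

-- ===== VERDICT (by name: the statement is the Claim_ definition above) =====
theorem drop_any_eq_any (rs : List (Int × Int)) (l : Int × Int) (x : Int × Int)
    (hgl : rs.getLast? = some l)
    (hx : pvCovers l x = true → ∃ r ∈ rs.dropLast, pvCovers r x = true) :
    rs.dropLast.any (fun r => pvCovers r x) = rs.any (fun r => pvCovers r x) := by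
  conv_rhs => rw [← List.dropLast_append_getLast? _ hgl]
  rw [List.any_append]
  simp only [List.any_cons, List.any_nil, Bool.or_false]
  cases hc : pvCovers l x with
  | false => simp
  | true =>
    obtain ⟨r, hr, hcr⟩ := hx hc
    rw [List.any_eq_true.mpr ⟨r, hr, hcr⟩]
    simp

theorem pvL_eq (m : List (Int × Int)) : pvL m = PySem.List.sorted m (fun x => x.1) := rfl

theorem pvLast2_cons (d : Int) (x : Int × Int) (t : List (Int × Int)) :
    pvLast2 d (x :: t) = pvLast2 x.2 t := by
  cases ht : t.getLast? with
  | none => simp [pvLast2, List.getLast?_cons, ht]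
  | some y => simp [pvLast2, List.getLast?_cons, ht]

-- a single gap-free chain is one run
theorem runsGo_chain (L : List (Int × Int)) (s e : Int)
    (h : ((s, e) :: L).IsChain (fun a b => b.1 ≤ a.2 + 1)) :
    pvRunsGo s e L = [(s, pvLast2 e L)] := by
  induction L generalizing e with
  | nil => simp [pvRunsGo, pvLast2]
  | cons x t ih =>
    obtain ⟨a, b⟩ := x
    have h1 : a ≤ e + 1 := (List.isChain_cons_cons.mp h).1
    have h2 := (List.isChain_cons_cons.mp h).2
    have h3 : ((s, b) :: t).IsChain (fun a b => b.1 ≤ a.2 + 1) := by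
      cases t with
      | nil => simp
      | cons y t' =>
        exact List.isChain_cons_cons.mpr
          ⟨(List.isChain_cons_cons.mp h2).1, (List.isChain_cons_cons.mp h2).2⟩
    simp only [pvRunsGo]
    rw [if_pos h1, pvLast2_cons, ih b h3]

-- a gap splits the run computation
theorem runsGo_split (X : List (Int × Int)) (s e c d : Int) (Y : List (Int × Int))
    (hc : pvLast2 e X + 1 < c) :
    pvRunsGo s e (X ++ (c, d) :: Y) = pvRunsGo s e X ++ pvRunsGo c d Y := by
  induction X generalizing s e with
  | nil =>
    simp only [pvLast2, List.getLast?_nil] at hc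
    rw [List.nil_append]
    simp only [pvRunsGo]
    rw [if_neg (by omega)]
    rfl
  | cons x X' ih =>
    obtain ⟨a, b⟩ := x
    rw [pvLast2_cons] at hc
    by_cases hle : a ≤ e + 1
    · rw [List.cons_append]
      simp only [pvRunsGo]
      rw [if_pos hle, if_pos hle]
      exact ih s b hc
    · rw [List.cons_append]
      simp only [pvRunsGo]
      rw [if_neg hle, if_neg hle, ih a b hc, List.cons_append]

-- the last run of a list decomposed as pre ++ gap-free suffix with a gap at the junction
theorem runs_last_of_decomp (pre : List (Int × Int)) (c d : Int) (suf' : List (Int × Int))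
    (hch : ((c, d) :: suf').IsChain (fun a b => b.1 ≤ a.2 + 1))
    (hj : ∀ p ∈ pre.getLast?, p.2 + 1 < c) :
    (pvRuns (pre ++ (c, d) :: suf')).getLast? = some (c, pvLast2 d suf') := by
  cases pre with
  | nil =>
    rw [List.nil_append]
    show (pvRunsGo c d suf').getLast? = _
    rw [runsGo_chain suf' c d hch]
    rfl
  | cons x pre' =>
    obtain ⟨a, b⟩ := x
    have hj' : pvLast2 b pre' + 1 < c := by
      have := hj (pre'.getLast?.getD (a, b)) (by rw [List.getLast?_cons]; rfl)
      cases hg : pre'.getLast? with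
      | none => rw [hg] at this; simpa [pvLast2, hg] using this
      | some y => rw [hg] at this; simpa [pvLast2, hg] using this
    rw [List.cons_append]
    show (pvRunsGo a b (pre' ++ (c, d) :: suf')).getLast? = _
    rw [runsGo_split pre' a b c d suf' hj', runsGo_chain suf' c d hch, List.getLast?_concat]

-- every nonempty list has such a decomposition
theorem runs_decomp_exists (M : List (Int × Int)) (hM : M ≠ []) :
    ∃ (pre : List (Int × Int)) (c d : Int) (suf' : List (Int × Int)),
      M = pre ++ (c, d) :: suf' ∧ ((c, d) :: suf').IsChain (fun a b => b.1 ≤ a.2 + 1) ∧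
      (∀ p ∈ pre.getLast?, p.2 + 1 < c) := by
  induction M with
  | nil => exact absurd rfl hM
  | cons x M' ih =>
    obtain ⟨a, b⟩ := x
    cases M' with
    | nil => exact ⟨[], a, b, [], by simp, by simp, by simp⟩
    | cons y M'' =>
      obtain ⟨pre, c, d, suf', hsplit, hch, hj⟩ := ih (by simp)
      cases pre with
      | nil =>
        simp only [List.nil_append] at hsplit
        by_cases hg : c ≤ b + 1
        · refine ⟨[], a, b, y :: M'', by simp, ?_, by simp⟩
          rw [hsplit]
          exact List.isChain_cons_cons.mpr ⟨hg, hch⟩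
        · refine ⟨[(a, b)], c, d, suf', by rw [hsplit]; rfl, hch, ?_⟩
          intro p hp
          simp only [List.getLast?_singleton, Option.mem_def, Option.some.injEq] at hp
          subst hp
          omega
      | cons p pre' =>
        refine ⟨(a, b) :: p :: pre', c, d, suf', by rw [hsplit]; rfl, hch, ?_⟩
        rwa [List.getLast?_cons_cons]

theorem get_covered_ranges_spec : Claim_unchanged_get_covered_ranges := by
  intro f m _ hD
  rw [getA_eq_filter, getB_eq_filter, merge_ranges_eq]
  simp only []
  cases hgl : (pvRuns (PySem.List.sorted m (fun x => x.1))).getLast? with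
  | none => simp
  | some l =>
    by_cases hz : l.1 = 0
    · rw [Option.any_some, if_pos (by simpa using hz)]
      have hLne : PySem.List.sorted m (fun x => x.1) ≠ [] := by
        intro h
        rw [h] at hgl
        simp [pvRuns] at hgl
      obtain ⟨pre, c, d, suf', hsplit, hch, hj⟩ := runs_decomp_exists _ hLne
      have hlast := runs_last_of_decomp pre c d suf' hch hj
      rw [← hsplit, hgl] at hlast
      have hlc : l = (c, pvLast2 d suf') := Option.some.inj hlast
      have hc0 : c = 0 := by rw [hlc] at hz; exact hz
      apply List.filter_congr
      intro x hx
      apply drop_any_eq_any _ l _ hgl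
      intro hcov
      exfalso
      apply hD
      unfold D_get_covered_ranges
      simp only [pvL_eq]
      have hdrop : (PySem.List.sorted m (fun x => x.1)).drop pre.length = (c, d) :: suf' := by
        rw [hsplit]; exact List.drop_left
      have htake : (PySem.List.sorted m (fun x => x.1)).take pre.length = pre := by
        rw [hsplit]; exact List.take_left
      have hcov' := hcov
      simp only [pvCovers, Bool.and_eq_true, decide_eq_true_eq] at hcov'
      refine ⟨pre.length, ?_, ?_, ?_, ?_, ?_⟩
      · refine List.mem_range.mpr ?_
        rw [hsplit, List.length_append]
        simp
      · rw [hdrop]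
        simp [hc0]
      · rw [htake]
        cases hg : pre.getLast? with
        | none => simp
        | some y =>
          have := hj y (by rw [hg]; rfl)
          simp only [Option.all_some, decide_eq_true_eq]
          omega
      · rw [hdrop]; exact hch
      · rw [List.any_eq_true]
        refine ⟨x, (PySem.List.mem_sorted f _ _ x).mp hx, ?_⟩
        rw [hlc] at hcov'
        have hgL : (PySem.List.sorted m (fun x => x.1)).getLast? =
            some (suf'.getLast?.getD (c, d)) := by
          rw [hsplit, List.getLast?_append_of_ne_nil _ (by simp), List.getLast?_cons]
        have h2 : (suf'.getLast?.getD (c, d)).2 = pvLast2 d suf' := by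
          cases hg : suf'.getLast? with
          | none => simp [pvLast2, hg]
          | some y => simp [pvLast2, hg]
        rw [hgL, Bool.and_eq_true, Option.any_some]
        refine ⟨by simpa [hc0] using hcov'.1, ?_⟩
        rw [decide_eq_true_eq, h2]
        exact hcov'.2
    · rw [Option.any_some, if_neg (by simpa using hz)]

theorem get_covered_ranges_changed : Claim_changed_get_covered_ranges := by
  unfold Claim_changed_get_covered_ranges; decide
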